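-- pv_equiv track=rewrite | github.com/endomorphosis/ipfs_datasets_py | ipfs_datasets_py/processors/legal_scrapers/state_laws_agentic_daemon.py | _summarize_critic_issues
-- ===== SOURCE A (Python) =====
-- from typing import Any, Awaitable, Callable, Dict, Iterable, List, Optional, Sequence
--
-- def _summarize_critic_issues(issues: List[str]) -> str:
--     if not issues:
--         return "Coverage and ETL signals are stable; continue exploiting the best-known tactic."
--     if any(item.startswith("coverage-gaps") for item in issues):
--         return "Coverage gaps remain, so the next cycle should bias toward broader archival and search discovery."
--     if any(item.startswith("cloudflare-browser-challenge") for item in issues):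
--         return "Browser challenges are blocking weak states, so the next cycle should bias toward Cloudflare rendering, Playwright downloads, and router-guided fallback selection."
--     if any(item.startswith("document-recovery-stalled") for item in issues):
--         return "Document candidates are being found but recovery is stalling, so the next cycle should bias toward renderer-backed downloads and router-guided troubleshooting."
--     if any(item.startswith("document-recovery-ratio-low") for item in issues):
--         return "Document extraction throughput is below the configured threshold, so the next cycle should bias toward document-first tactics and renderer-backed recovery."
--     if any(item.startswith("document-candidate-gaps") for item in issues):
--         return "Document-heavy gaps remain, so the next cycle should bias toward Playwright downloads and processor-backed PDF/RTF extraction."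
--     if "quality-weak" in issues:
--         return "Coverage exists, but extraction quality is weak; bias toward render and precision tactics next."
--     if "fetch-success-low" in issues:
--         return "Fetch reliability is weak; bias toward alternative archival providers and relocation search."
--     return "Cycle surfaced mixed issues; continue exploring alternate tactics with provider diversity."
-- ===== SOURCE B (Python) =====
-- _TABLE = [
--     ("coverage-gaps", True,
--      "Coverage gaps remain, so the next cycle should bias toward broader archival and search discovery."),
--     ("cloudflare-browser-challenge", True,
--      "Browser challenges are blocking weak states, so the next cycle should bias toward Cloudflare rendering, Playwright downloads, and router-guided fallback selection."),
--     ("document-recovery-stalled", True,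
--      "Document candidates are being found but recovery is stalling, so the next cycle should bias toward renderer-backed downloads and router-guided troubleshooting."),
--     ("document-recovery-ratio-low", True,
--      "Document extraction throughput is below the configured threshold, so the next cycle should bias toward document-first tactics and renderer-backed recovery."),
--     ("document-candidate-gaps", True,
--      "Document-heavy gaps remain, so the next cycle should bias toward Playwright downloads and processor-backed PDF/RTF extraction."),
--     ("quality-weak", False,
--      "Coverage exists, but extraction quality is weak; bias toward render and precision tactics next."),
--     ("fetch-success-low", False,
--      "Fetch reliability is weak; bias toward alternative archival providers and relocation search."),
-- ]
--
--
-- def _summarize_critic_issues(issues):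
--     if not issues:
--         return "Coverage and ETL signals are stable; continue exploiting the best-known tactic."
--     flags = set()
--     for item in issues:
--         for key, is_prefix, _ in _TABLE:
--             if (item.startswith(key) if is_prefix else item == key):
--                 flags.add(key)
--     for key, _, message in _TABLE:
--         if key in flags:
--             return message
--     return "Cycle surfaced mixed issues; continue exploring alternate tactics with provider diversity."
-- ===== Notes on version B (the rewrite author's own statement) =====
-- stated objective: alternative
-- what changed: A re-scans the whole issue list once per known signal via an if/elif chain of any()/membership tests; B makes a single pass over issues recording matched keys of a shared priority table into a set, then returns the first table entry whose key was flagged.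
import Mathlib
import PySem

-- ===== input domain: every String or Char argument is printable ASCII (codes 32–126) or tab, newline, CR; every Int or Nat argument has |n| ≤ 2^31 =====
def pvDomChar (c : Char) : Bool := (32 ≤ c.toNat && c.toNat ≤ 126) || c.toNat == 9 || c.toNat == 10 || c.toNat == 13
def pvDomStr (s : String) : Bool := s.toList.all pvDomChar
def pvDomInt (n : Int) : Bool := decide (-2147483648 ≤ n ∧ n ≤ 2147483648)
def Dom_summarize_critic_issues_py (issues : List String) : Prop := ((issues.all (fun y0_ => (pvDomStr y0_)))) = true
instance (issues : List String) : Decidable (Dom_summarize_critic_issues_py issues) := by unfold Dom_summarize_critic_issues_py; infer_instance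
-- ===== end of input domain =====

-- B replaces A's repeated full-list scans by one index-building pass (a set of matched
-- table keys) followed by a flat priority lookup over the same table (objective: alternative).


-- ===== PORT A =====
def summarize_critic_issues_py (issues : List String) : String :=
  if issues = [] then
    "Coverage and ETL signals are stable; continue exploiting the best-known tactic."
  else if issues.any (fun item => PySem.Str.startswith item "coverage-gaps") then
    "Coverage gaps remain, so the next cycle should bias toward broader archival and search discovery."
  else if issues.any (fun item => PySem.Str.startswith item "cloudflare-browser-challenge") then
    "Browser challenges are blocking weak states, so the next cycle should bias toward Cloudflare rendering, Playwright downloads, and router-guided fallback selection."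
  else if issues.any (fun item => PySem.Str.startswith item "document-recovery-stalled") then
    "Document candidates are being found but recovery is stalling, so the next cycle should bias toward renderer-backed downloads and router-guided troubleshooting."
  else if issues.any (fun item => PySem.Str.startswith item "document-recovery-ratio-low") then
    "Document extraction throughput is below the configured threshold, so the next cycle should bias toward document-first tactics and renderer-backed recovery."
  else if issues.any (fun item => PySem.Str.startswith item "document-candidate-gaps") then
    "Document-heavy gaps remain, so the next cycle should bias toward Playwright downloads and processor-backed PDF/RTF extraction."
  else if issues.contains "quality-weak" then
    "Coverage exists, but extraction quality is weak; bias toward render and precision tactics next."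
  else if issues.contains "fetch-success-low" then
    "Fetch reliability is weak; bias toward alternative archival providers and relocation search."
  else
    "Cycle surfaced mixed issues; continue exploring alternate tactics with provider diversity."

-- ===== PORT B =====
def pvTableB : List (String × Bool × String) :=
  [ ("coverage-gaps", true,
     "Coverage gaps remain, so the next cycle should bias toward broader archival and search discovery."),
    ("cloudflare-browser-challenge", true,
     "Browser challenges are blocking weak states, so the next cycle should bias toward Cloudflare rendering, Playwright downloads, and router-guided fallback selection."),
    ("document-recovery-stalled", true,
     "Document candidates are being found but recovery is stalling, so the next cycle should bias toward renderer-backed downloads and router-guided troubleshooting."),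
    ("document-recovery-ratio-low", true,
     "Document extraction throughput is below the configured threshold, so the next cycle should bias toward document-first tactics and renderer-backed recovery."),
    ("document-candidate-gaps", true,
     "Document-heavy gaps remain, so the next cycle should bias toward Playwright downloads and processor-backed PDF/RTF extraction."),
    ("quality-weak", false,
     "Coverage exists, but extraction quality is weak; bias toward render and precision tactics next."),
    ("fetch-success-low", false,
     "Fetch reliability is weak; bias toward alternative archival providers and relocation search.") ]

def pvMatchB (item key : String) (isPre : Bool) : Bool :=
  if isPre then PySem.Str.startswith item key else item == key

def pvFlags (issues : List String) : PySem.Set String :=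
  issues.foldl
    (fun fl item =>
      pvTableB.foldl
        (fun fl e => if pvMatchB item e.1 e.2.1 then PySem.Set.add fl e.1 else fl) fl)
    PySem.Set.empty

def summarize_critic_issues_py_alt (issues : List String) : String :=
  if issues = [] then
    "Coverage and ETL signals are stable; continue exploiting the best-known tactic."
  else
    let flags := pvFlags issues
    match pvTableB.find? (fun e => PySem.Set.contains flags e.1) with
    | some e => e.2.2
    | none => "Cycle surfaced mixed issues; continue exploring alternate tactics with provider diversity."

-- ===== PRECONDITION & SPEC =====
def Spec_summarize_critic_issues_py (issues : List String) (out : String) : Prop := out = summarize_critic_issues_py_alt issues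
instance (issues : List String) (out : String) : Decidable (Spec_summarize_critic_issues_py issues out) := by unfold Spec_summarize_critic_issues_py; infer_instance

-- ===== CLAIM (what is proved, stated in full; the proofs are below) =====
def Claim_equal_summarize_critic_issues_py : Prop := ∀ (issues : List String), Dom_summarize_critic_issues_py issues → Spec_summarize_critic_issues_py issues (summarize_critic_issues_py issues)

-- ===== LEMMAS AND PROOFS =====

-- one inner-loop step of B: which keys the set holds after scanning one item against the table
lemma pv_mem_step (tbl : List (String × Bool × String)) (fl : PySem.Set String) (item k : String) :
    k ∈ tbl.foldl
        (fun fl e => if pvMatchB item e.1 e.2.1 then PySem.Set.add fl e.1 else fl) fl ↔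
      k ∈ fl ∨ ∃ e ∈ tbl, e.1 = k ∧ pvMatchB item e.1 e.2.1 = true := by
  induction tbl generalizing fl with
  | nil => simp
  | cons x xs ih =>
    rw [List.foldl_cons, ih]
    by_cases h : pvMatchB item x.1 x.2.1 = true <;>
      simp [h, PySem.Set.mem_add] <;> aesop

-- the whole first pass: k is flagged iff some item of issues matches a table entry with key k
lemma pv_mem_fold (issues : List String) (s0 : PySem.Set String) (k : String) :
    k ∈ issues.foldl
        (fun fl item =>
          pvTableB.foldl
            (fun fl e => if pvMatchB item e.1 e.2.1 then PySem.Set.add fl e.1 else fl) fl) s0 ↔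
      k ∈ s0 ∨ ∃ item ∈ issues, ∃ e ∈ pvTableB, e.1 = k ∧ pvMatchB item e.1 e.2.1 = true := by
  induction issues generalizing s0 with
  | nil => simp
  | cons x xs ih =>
    rw [List.foldl_cons, ih, pv_mem_step]
    simp only [List.exists_mem_cons_iff]
    exact or_assoc

-- contains on the flag set, as a scan of issues with the key's own match predicate
lemma pv_contains_flags (issues : List String) (k : String) (isPre : Bool)
    (h : ∀ item, (∃ e ∈ pvTableB, e.1 = k ∧ pvMatchB item e.1 e.2.1 = true) ↔
          pvMatchB item k isPre = true) :
    PySem.Set.contains (pvFlags issues) k = issues.any (fun item => pvMatchB item k isPre) := by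
  apply Bool.eq_iff_iff.mpr
  rw [PySem.Set.contains_iff]
  unfold pvFlags
  rw [pv_mem_fold]
  simp [PySem.Set.empty, List.any_eq_true, h]

-- ===== VERDICT (by name: the statement is the Claim_ definition above) =====
theorem summarize_critic_issues_py_spec : Claim_equal_summarize_critic_issues_py := by
  intro issues _
  unfold Spec_summarize_critic_issues_py
  by_cases h : issues = []
  · simp [summarize_critic_issues_py, summarize_critic_issues_py_alt, h]
  · have hc1 := pv_contains_flags issues "coverage-gaps" true
      (by intro item; simp [pvTableB, pvMatchB])
    have hc2 := pv_contains_flags issues "cloudflare-browser-challenge" true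
      (by intro item; simp [pvTableB, pvMatchB])
    have hc3 := pv_contains_flags issues "document-recovery-stalled" true
      (by intro item; simp [pvTableB, pvMatchB])
    have hc4 := pv_contains_flags issues "document-recovery-ratio-low" true
      (by intro item; simp [pvTableB, pvMatchB])
    have hc5 := pv_contains_flags issues "document-candidate-gaps" true
      (by intro item; simp [pvTableB, pvMatchB])
    have hc6 := pv_contains_flags issues "quality-weak" false
      (by intro item; simp [pvTableB, pvMatchB])
    have hc7 := pv_contains_flags issues "fetch-success-low" false
      (by intro item; simp [pvTableB, pvMatchB])
    simp only [pvMatchB, if_pos rfl, if_true] at hc1 hc2 hc3 hc4 hc5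
    simp only [pvMatchB, if_false, Bool.false_eq_true, if_neg] at hc6 hc7
    have hq : issues.contains "quality-weak" = issues.any (fun item => item == "quality-weak") := by
      apply Bool.eq_iff_iff.mpr; simp [List.any_eq_true]
    have hf : issues.contains "fetch-success-low" = issues.any (fun item => item == "fetch-success-low") := by
      apply Bool.eq_iff_iff.mpr; simp [List.any_eq_true]
    simp only [summarize_critic_issues_py, summarize_critic_issues_py_alt, pvTableB,
      List.find?, if_neg h, hc1, hc2, hc3, hc4, hc5, hc6, hc7, hq, hf]
    cases b1 : issues.any (fun item => PySem.Str.startswith item "coverage-gaps") with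
    | true => simp only [b1]; simp
    | false =>
    cases b2 : issues.any (fun item => PySem.Str.startswith item "cloudflare-browser-challenge") with
    | true => simp only [b1, b2]; simp
    | false =>
    cases b3 : issues.any (fun item => PySem.Str.startswith item "document-recovery-stalled") with
    | true => simp only [b1, b2, b3]; simp
    | false =>
    cases b4 : issues.any (fun item => PySem.Str.startswith item "document-recovery-ratio-low") with
    | true => simp only [b1, b2, b3, b4]; simp
    | false =>
    cases b5 : issues.any (fun item => PySem.Str.startswith item "document-candidate-gaps") with
    | true => simp only [b1, b2, b3, b4, b5]; simp
    | false =>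
    cases b6 : issues.any (fun item => item == "quality-weak") with
    | true => simp only [b1, b2, b3, b4, b5, b6]; simp
    | false =>
    cases b7 : issues.any (fun item => item == "fetch-success-low") with
    | true => simp only [b1, b2, b3, b4, b5, b6, b7]; simp
    | false => simp only [b1, b2, b3, b4, b5, b6, b7]; simp
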